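-- pv_equiv track=rewrite | github.com/MattMNIA/Braille-Translator | English_To_Braille/braille_writer.py | dotSeparator
-- ===== SOURCE A (Python) =====
-- def dotSeparator(arr):
--     """
--     Separates both parts of a symbol
--     param: arr: array to be split
--     return: tuple(list1,list2)
--     """
--     list1 = list()
--     list2 = list()
--     zeroFound = False
--     for n in arr:
--         if n == 0:
--             zeroFound = True
--         elif zeroFound:
--             list2.append(n)
--         else:
--             list1.append(n)
--     return (list1,list2)
-- ===== SOURCE B (Python) =====
-- def dotSeparator(arr):
--     """
--     Separates both parts of a symbol
--     param: arr: array to be split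
--     return: tuple(list1,list2)
--     """
--     try:
--         idx = arr.index(0)
--     except ValueError:
--         return (list(arr), [])
--     return (arr[:idx], [n for n in arr[idx + 1:] if n != 0])
-- ===== Notes on version B (the rewrite author's own statement) =====
-- stated objective: alternative
-- what changed: Replaced the flag-driven single accumulation loop by locating the first zero with list.index and building the two parts as a slice before it and a zero-filtered slice after it.
import Mathlib
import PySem

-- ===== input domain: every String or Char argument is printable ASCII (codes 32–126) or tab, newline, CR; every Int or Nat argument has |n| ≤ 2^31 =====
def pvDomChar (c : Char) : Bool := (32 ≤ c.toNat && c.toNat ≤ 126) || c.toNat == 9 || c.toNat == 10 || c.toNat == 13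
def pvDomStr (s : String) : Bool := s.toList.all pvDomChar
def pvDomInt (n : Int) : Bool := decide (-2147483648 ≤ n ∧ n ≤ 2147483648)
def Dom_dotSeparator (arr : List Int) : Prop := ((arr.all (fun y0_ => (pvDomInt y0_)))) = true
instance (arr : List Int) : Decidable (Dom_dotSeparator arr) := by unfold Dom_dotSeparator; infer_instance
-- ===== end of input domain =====

-- B locates the first zero and returns the slice before it and the zero-filtered slice after it,
-- instead of A's flag-driven single accumulation loop; same result, alternative decomposition.


-- ===== PORT A =====
-- loop body: if n == 0: zeroFound = True; elif zeroFound: list2.append(n); else: list1.append(n)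
def dotSepStep (s : List Int × List Int × Bool) (n : Int) : List Int × List Int × Bool :=
  if n == 0 then (s.1, s.2.1, true)
  else if s.2.2 then (s.1, s.2.1 ++ [n], s.2.2)
  else (s.1 ++ [n], s.2.1, s.2.2)

def dotSeparator (arr : List Int) : List Int × List Int :=
  let r := arr.foldl dotSepStep ([], [], false)
  (r.1, r.2.1)

-- ===== PORT B =====
-- idx = arr.index(0); (arr[:idx], [n for n in arr[idx+1:] if n != 0]); on ValueError (list(arr), [])
def dotSeparator_alt (arr : List Int) : List Int × List Int :=
  match PySem.List.index? arr 0 with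
  | none => (arr, [])
  | some idx =>
      (PySem.List.slice arr none (some (idx : Int)),
       (PySem.List.slice arr (some ((idx : Int) + 1)) none).filter (fun n => n != 0))

-- ===== PRECONDITION & SPEC =====
def Spec_dotSeparator (arr : List Int) (out : List Int × List Int) : Prop := out = dotSeparator_alt arr
instance (arr : List Int) (out : List Int × List Int) : Decidable (Spec_dotSeparator arr out) := by unfold Spec_dotSeparator; infer_instance

-- ===== CLAIM (what is proved, stated in full; the proofs are below) =====
def Claim_equal_dotSeparator : Prop := ∀ (arr : List Int), Dom_dotSeparator arr → Spec_dotSeparator arr (dotSeparator arr)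

-- ===== LEMMAS AND PROOFS =====

lemma step_zero (l1 l2 : List Int) (f : Bool) : dotSepStep (l1, l2, f) 0 = (l1, l2, true) := by
  simp [dotSepStep]

lemma step_true (l1 l2 : List Int) (n : Int) (hn : n ≠ 0) :
    dotSepStep (l1, l2, true) n = (l1, l2 ++ [n], true) := by
  simp [dotSepStep, hn]

lemma step_false (l1 l2 : List Int) (n : Int) (hn : n ≠ 0) :
    dotSepStep (l1, l2, false) n = (l1 ++ [n], l2, false) := by
  simp [dotSepStep, hn]

-- B on a list starting with 0 keeps nothing before the zero and filters the tail
lemma alt_cons_zero (t : List Int) :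
    dotSeparator_alt (0 :: t) = ([], t.filter (fun n => n != 0)) := by
  rw [dotSeparator_alt, PySem.List.index?_cons_self]
  simp only [Nat.cast_zero, zero_add]
  rw [PySem.List.slice_from_one]
  have h1 := PySem.List.slice_to (0 :: t) (b := 0) (by norm_num)
  simp [h1]

-- B on a list starting with a non-zero element prepends it to the first part
lemma alt_cons_ne (n : Int) (t : List Int) (hn : n ≠ 0) :
    dotSeparator_alt (n :: t) = (n :: (dotSeparator_alt t).1, (dotSeparator_alt t).2) := by
  have h' : List.idxOf? 0 (n :: t) = (List.idxOf? 0 t).map (· + 1) := by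
    have := PySem.List.index?_cons_of_ne (xs := t) hn
    simpa using this
  cases h : List.idxOf? 0 t with
  | none => simp [dotSeparator_alt, h', h]
  | some k =>
      simp only [dotSeparator_alt, PySem.List.index?_eq_idxOf?, h', h, Option.map_some]
      have e2 : ((((k + 1 : Nat)) : Int)) + 1 = (((k + 2 : Nat)) : Int) := by push_cast; ring
      have e3 : ((k : Int)) + 1 = (((k + 1 : Nat)) : Int) := by push_cast; ring
      rw [e2, e3, PySem.List.slice_to_natCast, PySem.List.slice_from_natCast,
          PySem.List.slice_to_natCast, PySem.List.slice_from_natCast]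
      simp [List.take_succ_cons]

-- once zeroFound is true, A's loop only filters the rest into list2
lemma loop_true (t : List Int) : ∀ (l1 l2 : List Int),
    t.foldl dotSepStep (l1, l2, true) = (l1, l2 ++ t.filter (fun n => n != 0), true) := by
  induction t with
  | nil => simp
  | cons n t ih =>
      intro l1 l2
      by_cases hn : n = 0
      · subst hn; rw [List.foldl_cons, step_zero, ih]; simp
      · rw [List.foldl_cons, step_true _ _ _ hn, ih]
        simp [hn]

-- A's loop from the initial state computes B's two parts (the flag records membership of 0)
lemma loop_false (arr : List Int) : ∀ (l1 : List Int),
    arr.foldl dotSepStep (l1, [], false)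
    = (l1 ++ (dotSeparator_alt arr).1, (dotSeparator_alt arr).2, decide (0 ∈ arr)) := by
  induction arr with
  | nil => intro l1; simp [dotSeparator_alt, PySem.List.index?]
  | cons n t ih =>
      intro l1
      by_cases hn : n = 0
      · subst hn
        rw [List.foldl_cons, step_zero, loop_true, alt_cons_zero]
        simp
      · rw [alt_cons_ne n t hn, List.foldl_cons, step_false _ _ _ hn, ih (l1 ++ [n])]
        simp [Ne.symm hn]

-- ===== VERDICT (by name: the statement is the Claim_ definition above) =====
theorem dotSeparator_spec : Claim_equal_dotSeparator := by
  intro arr _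
  unfold Spec_dotSeparator dotSeparator
  rw [loop_false arr []]
  simp
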